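-- pv_equiv track=rewrite | github.com/senicko/dsa | graphs/problems/flight.py | flight
-- ===== SOURCE A (Python) =====
-- def build_graph(edges):
--     n = max(edges, key=lambda e: max(e[0], e[1]))
--     n = max(n[0], n[1]) + 1
--
--     graph = [[] for _ in range(n)]
--
--     for u, v, p in edges:
--         graph[u].append((v, p))
--         graph[v].append((u, p))
--
--     return graph
--
-- def flight(L, x, y, t):
--     graph = build_graph(L)
--     n = len(graph)
--
--     def dfs_visit(u, min_p, max_p, visited):
--         if u == y:
--             return
--
--         for v, p in graph[u]:
--             if not visited[v] and p - t <= max_p and p + t >= min_p: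
--                 visited[v] = True
--                 dfs_visit(v, max(min_p, p - t), min(max_p, p + t), visited)
--
--     for u, p in graph[x]:
--         visited = [False] * n
--         visited[x] = visited[u] = True
--
--         dfs_visit(u, p - t, p + t, visited)
--
--         if visited[y]:
--             return True
--
--     return False
-- ===== SOURCE B (Python) =====
-- def build_graph(edges):
--     n = max(edges, key=lambda e: max(e[0], e[1]))
--     n = max(n[0], n[1]) + 1
--
--     graph = [[] for _ in range(n)]
--
--     for u, v, p in edges:
--         graph[u].append((v, p))
--         graph[v].append((u, p))
--
--     return graph
--
-- def flight(L, x, y, t):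
--     # Iterative DFS with an explicit stack of (node, min_p, max_p, neighbour-iterator)
--     # frames emulating the call stack, instead of recursion.
--     graph = build_graph(L)
--     n = len(graph)
--
--     for u, p in graph[x]:
--         visited = [False] * n
--         visited[x] = visited[u] = True
--
--         stack = [(u, p - t, p + t, iter(graph[u]))]
--         while stack:
--             node, mn, mx, it = stack[-1]
--             if node == y:
--                 stack.pop()
--                 continue
--             step = next(it, None)
--             if step is None:
--                 stack.pop()
--                 continue
--             v, q = step
--             if not visited[v] and q - t <= mx and q + t >= mn:
--                 visited[v] = True
--                 stack.append((v, max(mn, q - t), min(mx, q + t), iter(graph[v])))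
--
--         if visited[y]:
--             return True
--
--     return False
-- ===== Notes on version B (the rewrite author's own statement) =====
-- stated objective: alternative
-- what changed: The recursive dfs_visit is replaced by an iterative DFS whose explicit stack of (node, min_p, max_p, neighbour-iterator) frames emulates the call stack one neighbour at a time, removing recursion (and Python's recursion-depth limit) while keeping the exact visit order.
import Mathlib
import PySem

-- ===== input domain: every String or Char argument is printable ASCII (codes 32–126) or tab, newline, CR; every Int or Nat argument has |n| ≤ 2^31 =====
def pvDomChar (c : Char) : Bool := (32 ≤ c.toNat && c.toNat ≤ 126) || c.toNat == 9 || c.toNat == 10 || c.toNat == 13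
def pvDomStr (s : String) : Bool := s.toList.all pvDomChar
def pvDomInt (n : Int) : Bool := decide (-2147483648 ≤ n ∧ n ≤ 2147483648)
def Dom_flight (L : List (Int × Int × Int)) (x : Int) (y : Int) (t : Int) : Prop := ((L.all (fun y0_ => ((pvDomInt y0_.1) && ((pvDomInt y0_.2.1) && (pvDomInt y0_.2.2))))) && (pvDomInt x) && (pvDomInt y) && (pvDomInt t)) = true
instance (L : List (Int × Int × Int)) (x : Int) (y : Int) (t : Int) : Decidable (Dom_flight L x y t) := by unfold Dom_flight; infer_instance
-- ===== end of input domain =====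

-- B replaces the recursive dfs_visit by an iterative DFS whose explicit stack of
-- (node, min_p, max_p, neighbour-iterator) frames emulates the call stack one
-- neighbour at a time (objective: alternative, no recursion; same cost).

-- ===== PORT A =====
-- shared helpers (Python shares build_graph and the list primitives between A and B)
-- Python index wraparound: a negative index counts from the end
def pvIdx (len : Nat) (i : Int) : Int := if i < 0 then i + len else i

-- visited[i]: exact (incl. wraparound) for -len ≤ i < len, the only case reached
-- under Pre_; out of range it yields true (Python raises IndexError there)
def pvGetB (vis : List Bool) (i : Int) : Bool :=
  let j := pvIdx vis.length i
  if 0 ≤ j then vis.getD j.toNat true else true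

-- visited[i] = True: exact (incl. wraparound) for -len ≤ i < len (ensured under Pre_)
def pvSetB (vis : List Bool) (i : Int) : List Bool :=
  let j := pvIdx vis.length i
  if 0 ≤ j then vis.set j.toNat true else vis

-- graph[i].append(e): exact (incl. wraparound) for -len ≤ i < len (ensured under Pre_)
def pvAppend (g : List (List (Int × Int))) (i : Int) (e : Int × Int) :
    List (List (Int × Int)) :=
  let j := pvIdx g.length i
  if 0 ≤ j then g.modify j.toNat (fun l => l ++ [e]) else g

-- graph[i]: exact for 0 ≤ i < len(graph) (ensured under Pre_)
def pvAdj (g : List (List (Int × Int))) (i : Int) : List (Int × Int) :=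
  (PySem.List.pyGet? g i).getD []

def countFalse (vis : List Bool) : Nat := vis.count false

-- build_graph, transliterated: n from max(edges, key=...), then two appends per edge
def buildGraph (L : List (Int × Int × Int)) : List (List (Int × Int)) :=
  match PySem.List.max? L (fun e => max e.1 e.2.1) with
  | none => []   -- Python raises ValueError on empty L (outside Pre_)
  | some e =>
    let n : Int := max e.1 e.2.1 + 1
    let g0 : List (List (Int × Int)) := List.replicate n.toNat []
    L.foldl (fun g e =>
      pvAppend (pvAppend g e.1 (e.2.1, e.2.2)) e.2.1 (e.1, e.2.2)) g0

-- termination helper for both DFS ports: marking an unvisited node shrinks countFalse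
theorem count_false_set_lt (l : List Bool) (n : Nat) (h : l.getD n true = false) :
    (l.set n true).count false < l.count false := by
  induction l generalizing n with
  | nil => simp [List.getD] at h
  | cons b bs ih =>
    cases n with
    | zero =>
      simp [List.getD] at h
      subst h
      simp
    | succ m =>
      simp only [List.getD_cons_succ] at h
      simp only [List.set_cons_succ, List.count_cons]
      have := ih m h
      omega

theorem countFalse_setB_lt (vis : List Bool) (v : Int) (h : pvGetB vis v = false) :
    countFalse (pvSetB vis v) < countFalse vis := by
  unfold pvGetB at h
  unfold pvSetB countFalse
  by_cases h0 : 0 ≤ pvIdx vis.length v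
  · simp only [if_pos h0] at h ⊢
    exact count_false_set_lt vis _ h
  · simp [if_neg h0] at h

-- A's dfs_visit: the recursion over the neighbour list of u, with the u == y early
-- return inlined at the call site; the subtype records that visited only grows.
def dfsNs (g : List (List (Int × Int))) (y t : Int) :
    (ns : List (Int × Int)) → (mn mx : Int) → (vis : List Bool) →
    {v' : List Bool // countFalse v' ≤ countFalse vis}
  | [], _, _, vis => ⟨vis, le_rfl⟩
  | (v, q) :: rest, mn, mx, vis =>
    if h : pvGetB vis v = false ∧ q - t ≤ mx ∧ mn ≤ q + t then
      let vis1 := pvSetB vis v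
      have hlt : countFalse vis1 < countFalse vis := countFalse_setB_lt vis v h.1
      let r1 : {v' : List Bool // countFalse v' ≤ countFalse vis1} :=
        if v = y then ⟨vis1, le_rfl⟩
        else dfsNs g y t (pvAdj g v) (max mn (q - t)) (min mx (q + t)) vis1
      have h2 : countFalse r1.1 < countFalse vis := lt_of_le_of_lt r1.2 hlt
      let r2 := dfsNs g y t rest mn mx r1.1
      ⟨r2.1, le_trans r2.2 (le_of_lt h2)⟩
    else dfsNs g y t rest mn mx vis
termination_by ns _ _ vis => (countFalse vis, ns.length)
decreasing_by
  all_goals first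
    | exact Prod.Lex.left _ _ hlt
    | exact Prod.Lex.left _ _ h2
    | exact Prod.Lex.right _ (by simp)

def dfsVisit (g : List (List (Int × Int))) (y t u mn mx : Int) (vis : List Bool) : List Bool :=
  if u = y then vis else (dfsNs g y t (pvAdj g u) mn mx vis).1

-- A's outer loop: for u, p in graph[x]
def outerA (g : List (List (Int × Int))) (x y t : Int) (n : Nat) :
    List (Int × Int) → Bool
  | [] => false
  | (u, p) :: rest =>
    let vis0 := pvSetB (pvSetB (List.replicate n false) x) u
    let vis := dfsVisit g y t u (p - t) (p + t) vis0
    if pvGetB vis y then true else outerA g x y t n rest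

def flight (L : List (Int × Int × Int)) (x : Int) (y : Int) (t : Int) : Bool :=
  let g := buildGraph L
  outerA g x y t g.length (pvAdj g x)

-- ===== PORT B =====
-- the explicit DFS stack: frames (node, min_p, max_p, remaining neighbours)
def loopB (g : List (List (Int × Int))) (y t : Int) :
    (stack : List (Int × Int × Int × List (Int × Int))) → (vis : List Bool) → List Bool
  | [], vis => vis
  | (u, mn, mx, ns) :: rest, vis =>
    if u = y then loopB g y t rest vis
    else match ns with
      | [] => loopB g y t rest vis
      | (v, q) :: ns' =>
        if h : pvGetB vis v = false ∧ q - t ≤ mx ∧ mn ≤ q + t then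
          loopB g y t ((v, max mn (q - t), min mx (q + t), pvAdj g v) :: (u, mn, mx, ns') :: rest) (pvSetB vis v)
        else loopB g y t ((u, mn, mx, ns') :: rest) vis
termination_by stack vis => (countFalse vis, (stack.map (fun f => f.2.2.2.length + 1)).sum)
decreasing_by
  all_goals first
    | exact Prod.Lex.left _ _ (countFalse_setB_lt vis v h.1)
    | exact Prod.Lex.right _ (by simp)

def outerB (g : List (List (Int × Int))) (x y t : Int) (n : Nat) :
    List (Int × Int) → Bool
  | [] => false
  | (u, p) :: rest =>
    let vis0 := pvSetB (pvSetB (List.replicate n false) x) u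
    let vis := loopB g y t [(u, p - t, p + t, pvAdj g u)] vis0
    if pvGetB vis y then true else outerB g x y t n rest

def flight_alt (L : List (Int × Int × Int)) (x : Int) (y : Int) (t : Int) : Bool :=
  let g := buildGraph L
  outerB g x y t g.length (pvAdj g x)

-- ===== PRECONDITION & SPEC =====
-- Pre_ excludes exactly the inputs on which A raises: the empty edge list
-- (ValueError in max), a node id or x outside [-n, n) (IndexError), and an
-- out-of-range y when graph[x] is nonempty (visited[y] raises IndexError); an
-- out-of-range y with graph[x] empty stays inside (visited[y] is never read).
def pvMaxId (L : List (Int × Int × Int)) : Int :=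
  L.foldl (fun m e => max m (max e.1 e.2.1)) (-1)

def Pre_flight (L : List (Int × Int × Int)) (x : Int) (y : Int) (t : Int) : Prop :=
  let n : Int := pvMaxId L + 1
  L ≠ [] ∧ 1 ≤ n ∧
    (L.all fun e => decide (-n ≤ e.1) && decide (-n ≤ e.2.1)) = true ∧
    -n ≤ x ∧ x < n ∧
    ((-n ≤ y ∧ y < n) ∨
      (L.all fun e => decide ((e.1 - x) % n ≠ 0) && decide ((e.2.1 - x) % n ≠ 0)) = true)

instance (L : List (Int × Int × Int)) (x : Int) (y : Int) (t : Int) :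
    Decidable (Pre_flight L x y t) := by unfold Pre_flight; infer_instance

def pvWitness_flight : (List (Int × Int × Int)) × Int × Int × Int :=
  ([(0, 1, 5), (1, 2, 7)], 0, 2, 3)

def Spec_flight (L : List (Int × Int × Int)) (x : Int) (y : Int) (t : Int) (out : Bool) : Prop := out = flight_alt L x y t
instance (L : List (Int × Int × Int)) (x : Int) (y : Int) (t : Int) (out : Bool) : Decidable (Spec_flight L x y t out) := by unfold Spec_flight; infer_instance

-- ===== CLAIM (what is proved, stated in full; the proofs are below) =====
def Claim_equal_flight : Prop := ∀ (L : List (Int × Int × Int)) (x : Int) (y : Int) (t : Int), Dom_flight L x y t → Pre_flight L x y t → Spec_flight L x y t (flight L x y t)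

-- ===== LEMMAS AND PROOFS =====

-- the simulation: one stack frame processed by loopB is one dfs_visit body
theorem sim (g : List (List (Int × Int))) (y t u mn mx : Int) (ns : List (Int × Int))
    (rest : List (Int × Int × Int × List (Int × Int))) (vis : List Bool) :
    loopB g y t ((u, mn, mx, ns) :: rest) vis
      = loopB g y t rest (if u = y then vis else (dfsNs g y t ns mn mx vis).1) := by
  by_cases hy : u = y
  · rw [loopB.eq_def]
    simp only [if_pos hy]
  · cases ns with
    | nil =>
      rw [loopB.eq_def]
      simp only [if_neg hy]
      rw [dfsNs]
    | cons vq ns' =>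
      obtain ⟨v, q⟩ := vq
      by_cases h : pvGetB vis v = false ∧ q - t ≤ mx ∧ mn ≤ q + t
      · have hlt : countFalse (pvSetB vis v) < countFalse vis := countFalse_setB_lt vis v h.1
        rw [loopB.eq_def]
        simp only [if_neg hy, dif_pos h]
        rw [sim g y t v (max mn (q - t)) (min mx (q + t)) (pvAdj g v)
              ((u, mn, mx, ns') :: rest) (pvSetB vis v)]
        have hval : (if v = y then pvSetB vis v
              else (dfsNs g y t (pvAdj g v) (max mn (q - t)) (min mx (q + t)) (pvSetB vis v)).1)
            = (if v = y then (⟨pvSetB vis v, le_rfl⟩ : {v' : List Bool // countFalse v' ≤ countFalse (pvSetB vis v)})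
              else dfsNs g y t (pvAdj g v) (max mn (q - t)) (min mx (q + t)) (pvSetB vis v)).1 := by
          by_cases hv : v = y <;> simp [hv]
        have h2 : countFalse (if v = y then pvSetB vis v
              else (dfsNs g y t (pvAdj g v) (max mn (q - t)) (min mx (q + t)) (pvSetB vis v)).1)
            < countFalse vis := by
          by_cases hv : v = y
          · simpa [hv] using hlt
          · simp only [if_neg hv]
            exact lt_of_le_of_lt (dfsNs g y t (pvAdj g v) _ _ _).2 hlt
        rw [sim g y t u mn mx ns' rest _]
        rw [dfsNs, dif_pos h]
        simp only [if_neg hy]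
        rw [hval]
      · rw [loopB.eq_def]
        simp only [if_neg hy, dif_neg h]
        rw [sim g y t u mn mx ns' rest vis]
        rw [dfsNs, dif_neg h, if_neg hy]
termination_by (countFalse vis, ns.length)
decreasing_by
  all_goals first
    | exact Prod.Lex.left _ _ hlt
    | exact Prod.Lex.left _ _ h2
    | exact Prod.Lex.right _ (by simp)

theorem loopB_single (g : List (List (Int × Int))) (y t u mn mx : Int) (vis : List Bool) :
    loopB g y t [(u, mn, mx, pvAdj g u)] vis = dfsVisit g y t u mn mx vis := by
  rw [sim, dfsVisit]
  rw [loopB.eq_def]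

theorem outer_eq (g : List (List (Int × Int))) (x y t : Int) (n : Nat)
    (ls : List (Int × Int)) : outerB g x y t n ls = outerA g x y t n ls := by
  induction ls with
  | nil => rfl
  | cons up rest ih =>
    obtain ⟨u, p⟩ := up
    rw [outerA, outerB, loopB_single, ih]

-- ===== VERDICT (by name: the statement is the Claim_ definition above) =====
theorem flight_spec : Claim_equal_flight := by
  intro L x y t _ _
  unfold Spec_flight flight flight_alt
  rw [outer_eq]
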